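-- pv_equiv track=rewrite | github.com/PierreFromJicin/words_rotator | rotator.py | word_rotator_core
-- ===== SOURCE A (Python) =====
-- class WRCoreException(Exception):
--     def __init__(self, exc_object):
--         message = f"Word rotator core exception: {exc_object} is not a string!"
--         super().__init__(message)
--
-- def word_rotator_core(string_in) -> str:
--     """
--     This method rotate a letters in a words in a sentence
--     :param string_in:
--     :return: string_out or Exception with message
--     """
--     if type(string_in) is not str:                          # protection for a wrong input
--         raise WRCoreException(string_in)
--
--     words_list = string_in.split()                               # data preparing
--     words_rev_list: list = []
--     _tmp: str = ""
--     _commas: list = []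
--     _capital: list = []
--     _comma_flag: bool = False
--     _capital_flag: bool = False
--
--     for word in words_list:                                         # parsing of letters
--         word_l = list(word)
--         word_l.reverse()                                            # the core of rotation algorithm
--         word_r = ""
--         for _l in range(len(word_l)):
--             if word_l[_l] in ".!?":                                 # removing of end mark
--                 _tmp = word_l[_l]
--             elif word_l[_l] == ",":
--                 # commas detector
--                 _comma_flag = True
--             elif word_l[_l].isupper():                                # capital letter detector
--                 _capital_flag = True
--                 word_r += word_l[_l]
--             else:
--                 word_r += word_l[_l]
--         if (_comma_flag is True) or (_capital_flag is True):                                     # commas stack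
--             if (_comma_flag is True) and (_capital_flag is True):
--                 _commas.append(1)
--                 _capital.append(1)
--                 _comma_flag = False
--                 _capital_flag = False
--                 words_rev_list.append(word_r.lower())
--             elif _comma_flag is True:                                 # capital stack
--                 _capital.append(0)
--                 _commas.append(1)
--                 _comma_flag = False
--                 words_rev_list.append(word_r.lower())
--             else:
--                 _commas.append(0)
--                 _capital.append(1)
--                 _capital_flag = False
--                 words_rev_list.append(word_r.lower())
--         else:
--             words_rev_list.append(word_r.lower())
--             _commas.append(0)
--             _capital.append(0)
--
--     string_out = ""
--     for word_rl in range(len(words_rev_list)):                      # prepare output string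
--         if (_commas[word_rl] == 1) or (_capital[word_rl] == 1):
--             if (_commas[word_rl] == 1) and (_capital[word_rl] == 1):
--                 string_out += words_rev_list[word_rl].capitalize() + ", "
--             elif _commas[word_rl] == 1:
--                 string_out += words_rev_list[word_rl] + ", "
--             else:
--                 string_out += words_rev_list[word_rl].capitalize() + " "
--         else:
--             string_out += words_rev_list[word_rl] + " "
--
--     string_out = (string_out[0: -1]) + _tmp
--     return string_out
-- ===== SOURCE B (Python) =====
-- class WRCoreException(Exception):
--     def __init__(self, exc_object):
--         message = f"Word rotator core exception: {exc_object} is not a string!"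
--         super().__init__(message)
--
-- def word_rotator_core(string_in) -> str:
--     """Single pass over the words: each word is rendered directly from its
--     reversed letters, comma/capital handled by membership tests; the shared
--     end-mark (last word's first mark) replaces the trailing space."""
--     if type(string_in) is not str:
--         raise WRCoreException(string_in)
--
--     parts = []
--     tmp = ""
--     for w in string_in.split():
--         mark = next((c for c in w if c in ".!?"), "")
--         if mark:
--             tmp = mark
--         core = "".join(c for c in reversed(w) if c not in ".!?,").lower()
--         if any(c.isupper() for c in w):
--             core = core.capitalize()
--         parts.append(core + (", " if "," in w else " "))
--     return "".join(parts)[:-1] + tmp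
-- ===== Notes on version B (the rewrite author's own statement) =====
-- stated objective: simpler
-- what changed: Replaces A's char-level flag machine with three parallel index arrays and a second indexed rendering pass by a single pass over the words that renders each segment directly via membership/any tests and a find-first end-mark, joining at the end.
import Mathlib
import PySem

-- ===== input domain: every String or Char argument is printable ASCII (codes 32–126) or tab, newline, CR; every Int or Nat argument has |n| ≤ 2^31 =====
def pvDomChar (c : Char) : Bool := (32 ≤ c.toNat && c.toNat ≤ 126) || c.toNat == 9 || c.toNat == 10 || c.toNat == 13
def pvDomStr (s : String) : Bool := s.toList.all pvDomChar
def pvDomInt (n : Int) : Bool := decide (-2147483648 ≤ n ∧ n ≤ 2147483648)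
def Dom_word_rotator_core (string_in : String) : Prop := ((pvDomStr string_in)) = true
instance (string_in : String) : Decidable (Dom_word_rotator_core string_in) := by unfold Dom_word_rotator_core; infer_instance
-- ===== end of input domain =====

-- B fuses A's flag machine + three parallel index arrays + second rendering pass into one
-- direct pass over the words (simpler; same asymptotic cost). Equivalence of return values.

-- c in ".!?" (both Pythons test membership in this literal)
def pvIsMark (c : Char) : Bool := c == '.' || c == '!' || c == '?'

-- Python str.capitalize() on ASCII: first char uppercased, the rest lowercased
def pvCapitalize (cs : List Char) : List Char :=
  match cs with
  | [] => []
  | c :: rest => PySem.Chars.upperChar c :: PySem.Chars.lower rest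

-- ===== PORT A =====
-- state of A's inner letter loop: (word_r, _tmp, _comma_flag, _capital_flag)
def pvAInner (s : List Char × List Char × Bool × Bool) (c : Char) : List Char × List Char × Bool × Bool :=
  match s with
  | (word_r, tmp, cf, kf) =>
    if pvIsMark c then (word_r, [c], cf, kf)
    else if c == ',' then (word_r, tmp, true, kf)
    else if PySem.Chars.isupper c then (word_r ++ [c], tmp, cf, true)
    else (word_r ++ [c], tmp, cf, kf)

-- state of A's word loop: (words_rev_list, _tmp, _commas, _capital, _comma_flag, _capital_flag)
def pvAOuter (st : List (List Char) × List Char × List Int × List Int × Bool × Bool)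
    (word : List Char) : List (List Char) × List Char × List Int × List Int × Bool × Bool :=
  match st with
  | (wrl, tmp, commas, capital, cf, kf) =>
    let word_l := word.reverse
    match word_l.foldl pvAInner (([] : List Char), tmp, cf, kf) with
    | (word_r, tmp, cf, kf) =>
      if cf || kf then
        if cf && kf then
          (wrl ++ [PySem.Chars.lower word_r], tmp, commas ++ [1], capital ++ [1], false, false)
        else if cf then
          (wrl ++ [PySem.Chars.lower word_r], tmp, commas ++ [1], capital ++ [0], false, kf)
        else
          (wrl ++ [PySem.Chars.lower word_r], tmp, commas ++ [0], capital ++ [1], cf, false)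
      else
        (wrl ++ [PySem.Chars.lower word_r], tmp, commas ++ [0], capital ++ [0], cf, kf)

def word_rotator_core (string_in : String) : String :=
  match (PySem.Chars.split₀ string_in.toList).foldl pvAOuter (([] : List (List Char)), ([] : List Char),
      ([] : List Int), ([] : List Int), false, false) with
  | (words_rev_list, tmp, commas, capital, _, _) =>
    String.ofList (PySem.List.slice
      ((PySem.List.pyRange 0 (PySem.List.len words_rev_list) 1).foldl
        (fun (out : List Char) (word_rl : Int) =>
          if PySem.List.pyGetD commas word_rl 0 = 1 ∨ PySem.List.pyGetD capital word_rl 0 = 1 then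
            if PySem.List.pyGetD commas word_rl 0 = 1 ∧ PySem.List.pyGetD capital word_rl 0 = 1 then
              out ++ pvCapitalize (PySem.List.pyGetD words_rev_list word_rl []) ++ [',', ' ']
            else if PySem.List.pyGetD commas word_rl 0 = 1 then
              out ++ PySem.List.pyGetD words_rev_list word_rl [] ++ [',', ' ']
            else
              out ++ pvCapitalize (PySem.List.pyGetD words_rev_list word_rl []) ++ [' ']
          else
            out ++ PySem.List.pyGetD words_rev_list word_rl [] ++ [' ']) [])
      none (some (-1)) ++ tmp)

-- ===== PORT B =====
-- one pass over the words: state is (parts, tmp)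
def pvBStep (st : List (List Char) × List Char) (w : List Char) : List (List Char) × List Char :=
  match st with
  | (parts, tmp) =>
    let tmp := match w.find? pvIsMark with | some c => [c] | none => tmp
    let core := PySem.Chars.lower (w.reverse.filter (fun c => !(pvIsMark c || c == ',')))
    let core := if w.any PySem.Chars.isupper then pvCapitalize core else core
    (parts ++ [core ++ (if PySem.Chars.isIn [','] w then [',', ' '] else [' '])], tmp)

def word_rotator_core_alt (string_in : String) : String :=
  match (PySem.Chars.split₀ string_in.toList).foldl pvBStep (([] : List (List Char)), ([] : List Char)) with
  | (parts, tmp) =>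
    String.ofList (PySem.List.slice (PySem.Chars.join [] parts) none (some (-1)) ++ tmp)

-- ===== PRECONDITION & SPEC =====
def Spec_word_rotator_core (string_in : String) (out : String) : Prop := out = word_rotator_core_alt string_in
instance (string_in : String) (out : String) : Decidable (Spec_word_rotator_core string_in out) := by unfold Spec_word_rotator_core; infer_instance

-- ===== CLAIM (what is proved, stated in full; the proofs are below) =====
def Claim_equal_word_rotator_core : Prop := ∀ (string_in : String), Dom_word_rotator_core string_in → Spec_word_rotator_core string_in (word_rotator_core string_in)

-- ===== LEMMAS AND PROOFS =====

-- abbreviations used only by the proofs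
def pvCore (w : List Char) : List Char :=
  PySem.Chars.lower (w.reverse.filter (fun c => !(pvIsMark c || c == ',')))
def pvCBit (w : List Char) : Int := if w.any (· == ',') then 1 else 0
def pvKBit (w : List Char) : Int := if w.any PySem.Chars.isupper then 1 else 0
def pvTmpStep (t : List Char) (w : List Char) : List Char :=
  match w.find? pvIsMark with | some c => [c] | none => t
def pvSeg (w : List Char) : List Char :=
  (if w.any PySem.Chars.isupper then pvCapitalize (pvCore w) else pvCore w) ++
    (if w.any (· == ',') then [',', ' '] else [' '])

theorem pv_mark_not_upper {c : Char} (h : pvIsMark c = true) : PySem.Chars.isupper c = false := by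
  simp only [pvIsMark, Bool.or_eq_true, beq_iff_eq] at h
  rcases h with (h | h) | h <;> subst h <;> decide

theorem pv_inner (cs : List Char) (r tmp : List Char) (cf kf : Bool) :
    cs.foldl pvAInner (r, tmp, cf, kf) =
      (r ++ cs.filter (fun c => !(pvIsMark c || c == ',')),
       (match cs.reverse.find? pvIsMark with | some c => [c] | none => tmp),
       cf || cs.any (· == ','),
       kf || cs.any PySem.Chars.isupper) := by
  induction cs generalizing r tmp cf kf with
  | nil => simp
  | cons c rest ih =>
    simp only [List.foldl_cons, List.reverse_cons, List.find?_append, List.any_cons]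
    by_cases hm : pvIsMark c = true
    · have hu := pv_mark_not_upper hm
      have hc : (c == ',') = false := by
        simp only [pvIsMark, Bool.or_eq_true, beq_iff_eq] at hm
        rcases hm with (h | h) | h <;> subst h <;> decide
      simp [pvAInner, hm, hc, hu, ih]
      cases rest.reverse.find? pvIsMark <;> simp
    · have hm' : pvIsMark c = false := by simpa using hm
      by_cases hc : (c == ',') = true
      · have hu : PySem.Chars.isupper c = false := by
          have : c = ',' := by simpa using hc
          subst this; decide
        simp [pvAInner, hm', hc, hu, ih]
      · have hc' : (c == ',') = false := by simpa using hc
        by_cases hu : PySem.Chars.isupper c = true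
        · simp [pvAInner, hm', hc', hu, ih]
        · have hu' : PySem.Chars.isupper c = false := by simpa using hu
          simp [pvAInner, hm', hc', hu', ih]

theorem pv_outer (ws : List (List Char)) (wrl : List (List Char)) (tmp : List Char)
    (commas capital : List Int) :
    ws.foldl pvAOuter (wrl, tmp, commas, capital, false, false) =
      (wrl ++ ws.map pvCore, ws.foldl pvTmpStep tmp,
       commas ++ ws.map pvCBit, capital ++ ws.map pvKBit, false, false) := by
  induction ws generalizing wrl tmp commas capital with
  | nil => simp
  | cons w rest ih =>
    have hinner := pv_inner w.reverse [] tmp false false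
    simp only [List.foldl_cons]
    rw [show pvAOuter (wrl, tmp, commas, capital, false, false) w =
        (wrl ++ [pvCore w], pvTmpStep tmp w, commas ++ [pvCBit w], capital ++ [pvKBit w],
          false, false) from ?_]
    · rw [ih]; simp [pvCore, pvCBit, pvKBit]
    · simp only [pvAOuter, hinner, List.reverse_reverse, List.any_reverse,
        List.filter_reverse, Bool.false_or]
      cases hcf : w.any (· == ',') <;> cases hkf : w.any PySem.Chars.isupper <;>
        simp [hcf, hkf, pvCore, pvCBit, pvKBit, pvTmpStep, List.filter_reverse]

theorem pv_join_nil_flatten (parts : List (List Char)) :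
    PySem.Chars.join [] parts = parts.flatten := by
  induction parts with
  | nil => simp [PySem.Chars.join_nil]
  | cons p rest ih =>
    cases rest with
    | nil => simp [PySem.Chars.join, List.intercalate, List.intersperse]
    | cons q r => rw [PySem.Chars.join_cons_cons]; simp_all

theorem pv_isIn_comma (w : List Char) : PySem.Chars.isIn [','] w = w.any (· == ',') := by
  rcases h : w.any (· == ',') with _ | _
  · simp only [Bool.eq_false_iff, ne_eq]
    intro hIn
    have := (PySem.Chars.isIn_iff_infix [','] w).mp hIn
    have : ',' ∈ w := this.mem (by simp)
    simp only [List.any_eq_false, beq_iff_eq] at h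
    exact h ',' this rfl
  · apply (PySem.Chars.isIn_iff_infix [','] w).mpr
    simp only [List.any_eq_true, beq_iff_eq] at h
    obtain ⟨c, hc, rfl⟩ := h
    obtain ⟨p, q, rfl⟩ := List.mem_iff_append.mp hc
    exact ⟨p, q, by simp⟩

theorem pv_bstep_fold (ws : List (List Char)) (parts : List (List Char)) (tmp : List Char) :
    ws.foldl pvBStep (parts, tmp) = (parts ++ ws.map pvSeg, ws.foldl pvTmpStep tmp) := by
  induction ws generalizing parts tmp with
  | nil => simp
  | cons w rest ih =>
    simp only [List.foldl_cons, pvBStep]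
    rw [ih]
    simp [pvSeg, pvCore, pvTmpStep, pv_isIn_comma]

theorem pv_render (ws : List (List Char)) :
    (PySem.List.pyRange 0 (PySem.List.len (ws.map pvCore)) 1).foldl
      (fun (out : List Char) (word_rl : Int) =>
        if PySem.List.pyGetD (ws.map pvCBit) word_rl 0 = 1 ∨ PySem.List.pyGetD (ws.map pvKBit) word_rl 0 = 1 then
          if PySem.List.pyGetD (ws.map pvCBit) word_rl 0 = 1 ∧ PySem.List.pyGetD (ws.map pvKBit) word_rl 0 = 1 then
            out ++ pvCapitalize (PySem.List.pyGetD (ws.map pvCore) word_rl []) ++ [',', ' ']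
          else if PySem.List.pyGetD (ws.map pvCBit) word_rl 0 = 1 then
            out ++ PySem.List.pyGetD (ws.map pvCore) word_rl [] ++ [',', ' ']
          else
            out ++ pvCapitalize (PySem.List.pyGetD (ws.map pvCore) word_rl []) ++ [' ']
        else
          out ++ PySem.List.pyGetD (ws.map pvCore) word_rl [] ++ [' ']) [] =
    (ws.map pvSeg).flatten := by
  have h1 : ∀ i : Int, PySem.List.pyGetD (ws.map pvCBit) i 0 = pvCBit (PySem.List.pyGetD ws i []) :=
    fun i => PySem.List.pyGetD_map pvCBit ws i []
  have h2 : ∀ i : Int, PySem.List.pyGetD (ws.map pvKBit) i 0 = pvKBit (PySem.List.pyGetD ws i []) :=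
    fun i => PySem.List.pyGetD_map pvKBit ws i []
  have h3 : ∀ i : Int, PySem.List.pyGetD (ws.map pvCore) i [] = pvCore (PySem.List.pyGetD ws i []) :=
    fun i => PySem.List.pyGetD_map pvCore ws i []
  have hlen : PySem.List.len (ws.map pvCore) = PySem.List.len ws := by
    simp [PySem.List.len_eq]
  simp only [h1, h2, h3, hlen]
  rw [PySem.List.foldl_pyRange_zero_pyGetD ws []
    (fun (out : List Char) (w : List Char) =>
      if pvCBit w = 1 ∨ pvKBit w = 1 then
        if pvCBit w = 1 ∧ pvKBit w = 1 then out ++ pvCapitalize (pvCore w) ++ [',', ' ']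
        else if pvCBit w = 1 then out ++ pvCore w ++ [',', ' ']
        else out ++ pvCapitalize (pvCore w) ++ [' ']
      else out ++ pvCore w ++ [' ']) []]
  have hf : (fun (out : List Char) (w : List Char) =>
      if pvCBit w = 1 ∨ pvKBit w = 1 then
        if pvCBit w = 1 ∧ pvKBit w = 1 then out ++ pvCapitalize (pvCore w) ++ [',', ' ']
        else if pvCBit w = 1 then out ++ pvCore w ++ [',', ' ']
        else out ++ pvCapitalize (pvCore w) ++ [' ']
      else out ++ pvCore w ++ [' ']) = fun out w => out ++ pvSeg w := by
    funext out w
    cases hc : w.any (· == ',') <;> cases hk : w.any PySem.Chars.isupper <;>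
      simp [pvCBit, pvKBit, pvSeg, hc, hk]
  rw [hf, PySem.List.foldl_append_eq_flatMap pvSeg ws []]
  simp [List.flatMap_def]

-- ===== VERDICT (by name: the statement is the Claim_ definition above) =====
theorem word_rotator_core_spec : Claim_equal_word_rotator_core := by
  intro s _
  show word_rotator_core s = word_rotator_core_alt s
  unfold word_rotator_core word_rotator_core_alt
  rw [pv_outer, pv_bstep_fold]
  dsimp only
  simp only [List.nil_append]
  rw [pv_render, pv_join_nil_flatten]
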